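-- pv_equiv track=rewrite | github.com/jasongullifer/fincen_114 | fin-cen-114.py | filter_subaccounts
-- ===== SOURCE A (Python) =====
-- def get_parent(account):
--     """Return the immediate parent account name, or None if account has no parent."""
--     if ":" in account:
--         return account.rsplit(":", 1)[0]
--     return None
--
-- def filter_subaccounts(subaccts, accounts_sorted):
--     """Separate direct children of subacct parents from the standalone account list.
--
--     Returns (subaccounts_sorted, standalone_accounts) where:
--       - subaccounts_sorted: dict mapping each parent in subaccts to its direct children
--       - standalone_accounts: accounts that are not direct children of any subacct parent,
--         with parent accounts that have children removed
--     """
--     subaccts = set(subaccts)              # O(1) lookups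
--     subaccounts_sorted = {m: [] for m in subaccts}
--     accounts_filtered = []
--     majors_with_children = set()
--
--     for account, (open_directive, close_directive) in accounts_sorted:
--         # Find nearest parent
--         parent = get_parent(account)
--
--         if parent and parent in subaccts:
--             subaccounts_sorted[parent].append((account, (open_directive, close_directive)))
--             majors_with_children.add(parent)
--         else:
--             accounts_filtered.append((account, (open_directive, close_directive)))
--
--     # Remove empty major buckets
--     subaccounts_sorted = {m: children for m, children in subaccounts_sorted.items() if children}
--
--     # Remove parent accounts from standalone list
--     accounts_filtered = [a for a in accounts_filtered if a[0] not in majors_with_children]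
--
--     return subaccounts_sorted, accounts_filtered
-- ===== SOURCE B (Python) =====
-- def get_parent(account):
--     """Return the immediate parent account name, or None if account has no parent."""
--     if ":" in account:
--         return account.rsplit(":", 1)[0]
--     return None
--
-- def filter_subaccounts(subaccts, accounts_sorted):
--     """Separate direct children of subacct parents from the standalone account list.
--
--     Index-first formulation: group accounts by their parent once, then select the
--     interesting buckets by subaccts, then build the standalone list in one pass.
--     """
--     sub = set(subaccts)
--
--     def routed(account):
--         p = get_parent(account)
--         return bool(p) and p in sub
--
--     children = {}
--     for a in accounts_sorted:
--         children.setdefault(get_parent(a[0]), []).append(a)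
--     buckets = {m: children[m] for m in sub if m and m in children}
--     standalone = [a for a in accounts_sorted
--                   if not routed(a[0]) and a[0] not in buckets]
--     return buckets, standalone
-- ===== Notes on version B (the rewrite author's own statement) =====
-- stated objective: alternative
-- what changed: Replaces A's single fused accumulate-loop (buckets pre-initialized for every subacct, standalone list and majors set updated together, then two post-filters) with an index-first form: one group-by-parent dict built once with no reference to subaccts, then the non-empty subacct buckets selected from it, then the standalone list built in one comprehension keyed by the bucket dict.
import Mathlib
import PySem

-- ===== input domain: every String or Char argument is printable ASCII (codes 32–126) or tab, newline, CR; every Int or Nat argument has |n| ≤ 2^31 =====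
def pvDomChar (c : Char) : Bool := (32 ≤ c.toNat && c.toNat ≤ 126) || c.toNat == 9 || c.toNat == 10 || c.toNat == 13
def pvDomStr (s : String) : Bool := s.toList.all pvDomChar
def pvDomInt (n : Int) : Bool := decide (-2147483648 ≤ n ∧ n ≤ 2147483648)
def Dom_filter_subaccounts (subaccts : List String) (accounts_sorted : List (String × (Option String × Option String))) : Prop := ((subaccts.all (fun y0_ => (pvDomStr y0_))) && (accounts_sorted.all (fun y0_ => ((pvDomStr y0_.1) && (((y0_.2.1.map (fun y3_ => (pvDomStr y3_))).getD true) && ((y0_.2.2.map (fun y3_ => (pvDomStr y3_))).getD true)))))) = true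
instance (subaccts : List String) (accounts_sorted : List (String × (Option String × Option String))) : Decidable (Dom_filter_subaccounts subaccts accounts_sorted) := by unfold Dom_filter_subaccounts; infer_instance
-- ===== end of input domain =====

-- B replaces A's fused accumulate-loop (pre-initialized buckets + majors set + post-filters) by a group-by-parent index built once and two selection passes; return values proved equal on all inputs.

-- shared module-level helper (used by both Pythons): get_parent
-- account.rsplit(":", 1)[0] ported by hand (no rsplit primitive): the chars before the LAST ':' — exact whenever ":" occurs in account
def get_parent (account : String) : Option String :=
  if PySem.Str.isIn ":" account then
    some (String.ofList ((((account.toList.reverse).dropWhile (fun c => c != ':')).drop 1).reverse))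
  else
    none

-- ===== PORT A =====
def filter_subaccounts (subaccts : List String) (accounts_sorted : List (String × (Option String × Option String))) : (List (String × List (String × (Option String × Option String)))) × (List (String × (Option String × Option String))) :=
  let subs : PySem.Set String := PySem.Set.ofList subaccts                       -- subaccts = set(subaccts)
  let d0 : PySem.Dict String (List (String × (Option String × Option String))) :=
    subs.foldl (fun d m => d.insert m []) PySem.Dict.empty                       -- {m: [] for m in subaccts}
  -- for account, (open, close) in accounts_sorted: … (one loop over the triple (dict, filtered, majors))
  let st := accounts_sorted.foldl
    (fun (s : PySem.Dict String (List (String × (Option String × Option String))) × List (String × (Option String × Option String)) × PySem.Set String) a =>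
      match get_parent a.1 with
      | some parent =>
        if parent != "" && PySem.Set.contains subs parent then                   -- if parent and parent in subaccts
          (s.1.modify parent [] (fun xs => xs ++ [a]), s.2.1, PySem.Set.add s.2.2 parent)
        else
          (s.1, s.2.1 ++ [a], s.2.2)
      | none => (s.1, s.2.1 ++ [a], s.2.2))
    (d0, ([] : List (String × (Option String × Option String))), (PySem.Set.empty : PySem.Set String))
  -- {m: children for m, children in … if children}
  let subaccounts_sorted := st.1.items.filter (fun mc => !mc.2.isEmpty)
  -- [a for a in accounts_filtered if a[0] not in majors_with_children]
  let accounts_filtered := st.2.1.filter (fun a => !(PySem.Set.contains st.2.2 a.1))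
  (subaccounts_sorted, accounts_filtered)

-- ===== PORT B =====
-- routed(account): get_parent(account) is truthy and in sub
def pvRouted (sub : PySem.Set String) (account : String) : Bool :=
  match get_parent account with
  | some p => p != "" && PySem.Set.contains sub p
  | none => false


def filter_subaccounts_alt (subaccts : List String) (accounts_sorted : List (String × (Option String × Option String))) : (List (String × List (String × (Option String × Option String)))) × (List (String × (Option String × Option String))) :=
  let sub : PySem.Set String := PySem.Set.ofList subaccts
  -- children = {}; for a in accounts_sorted: children.setdefault(get_parent(a[0]), []).append(a)
  let children : PySem.Dict (Option String) (List (String × (Option String × Option String))) :=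
    accounts_sorted.foldl (fun d a => d.modify (get_parent a.1) [] (fun xs => xs ++ [a])) PySem.Dict.empty
  -- {m: children[m] for m in sub if m and m in children}   (children[m] exists under the guard)
  let buckets := (sub.filter (fun m => m != "" && children.contains (some m))).map
      (fun m => (m, children.getD (some m) []))
  -- [a for a in accounts_sorted if not routed(a[0]) and a[0] not in buckets]
  let standalone := accounts_sorted.filter
      (fun a => !pvRouted sub a.1 && !((buckets.map Prod.fst).contains a.1))
  (buckets, standalone)

-- ===== PRECONDITION & SPEC =====
def Spec_filter_subaccounts (subaccts : List String) (accounts_sorted : List (String × (Option String × Option String))) (out : (List (String × List (String × (Option String × Option String)))) × (List (String × (Option String × Option String)))) : Prop := out = filter_subaccounts_alt subaccts accounts_sorted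
instance (subaccts : List String) (accounts_sorted : List (String × (Option String × Option String))) (out : (List (String × List (String × (Option String × Option String)))) × (List (String × (Option String × Option String)))) : Decidable (Spec_filter_subaccounts subaccts accounts_sorted out) := by
  unfold Spec_filter_subaccounts
  exact decidable_of_iff _ (Prod.ext_iff).symm

-- ===== CLAIM (what is proved, stated in full; the proofs are below) =====
def Claim_equal_filter_subaccounts : Prop := ∀ (subaccts : List String) (accounts_sorted : List (String × (Option String × Option String))), Dom_filter_subaccounts subaccts accounts_sorted → Spec_filter_subaccounts subaccts accounts_sorted (filter_subaccounts subaccts accounts_sorted)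

-- ===== LEMMAS AND PROOFS =====

abbrev PvAcc := String × (Option String × Option String)

-- B's grouping index: value of the children dict at some m
lemma pv_children_getD (accounts : List PvAcc) (f : PvAcc → Option String) (m : Option String) :
    (accounts.foldl (fun d a => d.modify (f a) [] (fun xs => xs ++ [a])) PySem.Dict.empty).getD m []
    = accounts.filter (fun a => f a == m) := by
  rw [show (accounts.foldl (fun d a => d.modify (f a) [] (fun xs => xs ++ [a])) PySem.Dict.empty)
      = (accounts.map (fun a => (f a, a))).foldl (fun d p => d.modify p.1 [] (fun xs => xs ++ [p.2])) PySem.Dict.empty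
    from by rw [List.foldl_map]]
  rw [PySem.Dict.getD_foldl_modify_append]
  rw [List.filter_map]
  simp [Function.comp_def]

-- B's grouping index: key membership of the children dict
lemma pv_children_contains (accounts : List PvAcc) (f : PvAcc → Option String) (m : Option String) :
    (accounts.foldl (fun d a => d.modify (f a) [] (fun xs => xs ++ [a])) PySem.Dict.empty).contains m
    = accounts.any (fun a => f a == m) := by
  apply Bool.coe_iff_coe.mp
  rw [PySem.Dict.contains_eq_decide_mem_keys, PySem.Dict.keys_foldl_modify_key]
  simp [PySem.Set.mem_ofList, List.any_eq_true]

-- the three independent accumulators of A's fused loop, separated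
lemma pv_split (subs : PySem.Set String) (l : List PvAcc)
    (d : PySem.Dict String (List PvAcc)) (fil : List PvAcc) (maj : PySem.Set String) :
    l.foldl
      (fun (s : PySem.Dict String (List PvAcc) × List PvAcc × PySem.Set String) a =>
        match get_parent a.1 with
        | some parent =>
          if parent != "" && PySem.Set.contains subs parent then
            (s.1.modify parent [] (fun xs => xs ++ [a]), s.2.1, PySem.Set.add s.2.2 parent)
          else
            (s.1, s.2.1 ++ [a], s.2.2)
        | none => (s.1, s.2.1 ++ [a], s.2.2)) (d, fil, maj)
    = (l.foldl (fun d a =>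
          match get_parent a.1 with
          | some parent =>
            if parent != "" && PySem.Set.contains subs parent then d.modify parent [] (fun xs => xs ++ [a]) else d
          | none => d) d,
       fil ++ l.filter (fun a => !pvRouted subs a.1),
       l.foldl (fun m a =>
          match get_parent a.1 with
          | some parent =>
            if parent != "" && PySem.Set.contains subs parent then PySem.Set.add m parent else m
          | none => m) maj) := by
  induction l generalizing d fil maj with
  | nil => simp
  | cons a l ih =>
    simp only [List.foldl_cons, List.filter_cons]
    cases hp : get_parent a.1 with
    | none =>
      have hfa : (!pvRouted subs a.1) = true := by simp [pvRouted, hp]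
      rw [ih]; simp [hp, hfa]
    | some p =>
      by_cases hc : (p != "" && PySem.Set.contains subs p) = true
      · have hfa : (!pvRouted subs a.1) = false := by simp only [pvRouted, hp, hc, Bool.not_true]
        simp only [hp, hc, if_pos]; rw [ih]; simp [hfa]
      · have hc' : (p != "" && PySem.Set.contains subs p) = false := by
          revert hc; cases (p != "" && PySem.Set.contains subs p) <;> simp
        have hfa : (!pvRouted subs a.1) = true := by simp only [pvRouted, hp, hc', Bool.not_false]
        simp only [hp, hc', Bool.false_eq_true, if_false]
        rw [ih]; simp [hfa]

-- d[p].append(a) on a dict whose items are ms.map (m, v m), p ∈ ms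
lemma pv_modify_mk_map (ms : List String) (v : String → List PvAcc) (p : String) (a : PvAcc)
    (hp : p ∈ ms) :
    (PySem.Dict.mk (ms.map (fun m => (m, v m)))).modify p [] (fun xs => xs ++ [a])
    = PySem.Dict.mk (ms.map (fun m => (m, if m = p then v m ++ [a] else v m))) := by
  have hfind : ms.find? (fun m => m == p) = some p := by
    induction ms with
    | nil => simp at hp
    | cons x ms ih =>
      rcases List.mem_cons.mp hp with h | h
      · subst h; simp
      · by_cases hx : (x == p) = true
        · simp [List.find?_cons, hx, (beq_iff_eq.mp hx)]
        · simp [List.find?_cons, hx]; exact ih h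
  have hcont : (PySem.Dict.mk (ms.map (fun m => (m, v m)))).contains p = true := by
    simp [PySem.Dict.contains, PySem.Dict.items, List.any_map]
    exact hp
  simp only [PySem.Dict.modify, PySem.Dict.getD, PySem.Dict.get?, PySem.Dict.items,
    PySem.Dict.insert, hcont, if_pos]
  congr 1
  rw [List.find?_map]
  simp only [Function.comp_def, hfind]
  rw [List.map_map]
  apply List.map_congr_left
  intro m _
  by_cases hm : m = p
  · subst hm; simp
  · simp [Function.comp_def, hm, (by simpa using hm : (m == p) = false)]

-- the dict accumulator: each key m of the initial dict ends with its direct children appended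
lemma pv_dict_loop (subs : PySem.Set String) (l : List PvAcc) (ms : List String)
    (hms : ∀ x : String, PySem.Set.contains subs x = true → x ∈ ms) (v : String → List PvAcc) :
    (l.foldl (fun d a =>
        match get_parent a.1 with
        | some parent =>
          if parent != "" && PySem.Set.contains subs parent then d.modify parent [] (fun xs => xs ++ [a]) else d
        | none => d) (PySem.Dict.mk (ms.map (fun m => (m, v m))))).items
    = ms.map (fun m => (m, v m ++ l.filter (fun a => pvRouted subs a.1 && (get_parent a.1 == some m)))) := by
  induction l generalizing v with
  | nil => simp
  | cons a l ih =>
    simp only [List.foldl_cons, List.filter_cons]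
    cases hp : get_parent a.1 with
    | none =>
      have hra : pvRouted subs a.1 = false := by simp only [pvRouted, hp]
      rw [ih]
      simp [hra]
    | some p =>
      by_cases hc : (p != "" && PySem.Set.contains subs p) = true
      · have hra : pvRouted subs a.1 = true := by simp only [pvRouted, hp]; exact hc
        have hpm : p ∈ ms := hms p (by simpa using (Bool.and_elim_right hc))
        simp only [hp, hc, if_pos]
        rw [pv_modify_mk_map ms v p a hpm, ih]
        apply List.map_congr_left
        intro m _
        by_cases hm : m = p
        · subst hm
          simp [hra, hp]
        · simp [hm, hp]
          exact fun _ h => hm h.symm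
      · have hc' : (p != "" && PySem.Set.contains subs p) = false := by
          revert hc; cases (p != "" && PySem.Set.contains subs p) <;> simp
        have hra : pvRouted subs a.1 = false := by simp only [pvRouted, hp]; exact hc'
        simp only [hp, hc', Bool.false_eq_true, if_false]
        rw [ih]
        simp [hra]

-- {m: [] for m in subaccts} as explicit items
lemma pv_init_dict (subs : PySem.Set String) (hnd : subs.Nodup) :
    subs.foldl (fun d m => d.insert m ([] : List PvAcc)) PySem.Dict.empty
    = PySem.Dict.mk (subs.map (fun m => (m, ([] : List PvAcc)))) := by
  apply PySem.Dict.ext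
  rw [PySem.Dict.items_foldl_insert_fresh (k := fun m => m) (v := fun _ => ([] : List PvAcc))]
  · simp [PySem.Dict.empty]
  · intro a _; simp [PySem.Dict.contains, PySem.Dict.empty]
  · simpa using hnd

-- membership in the majors_with_children accumulator
lemma pv_maj_mem (subs : PySem.Set String) (l : List PvAcc) (maj : PySem.Set String) (x : String) :
    (x ∈ l.foldl (fun m a =>
        match get_parent a.1 with
        | some parent =>
          if parent != "" && PySem.Set.contains subs parent then PySem.Set.add m parent else m
        | none => m) maj)
    ↔ x ∈ maj ∨ ∃ a ∈ l, pvRouted subs a.1 = true ∧ get_parent a.1 = some x := by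
  induction l generalizing maj with
  | nil => simp
  | cons a l ih =>
    simp only [List.foldl_cons]
    cases hp : get_parent a.1 with
    | none =>
      have hra : pvRouted subs a.1 = false := by simp only [pvRouted, hp]
      rw [ih]
      simp [hra]
    | some p =>
      by_cases hc : (p != "" && PySem.Set.contains subs p) = true
      · have hra : pvRouted subs a.1 = true := by simp only [pvRouted, hp]; exact hc
        simp only [hp, hc, if_pos]
        rw [ih]
        simp [hra, hp, PySem.Set.mem_add]
        aesop
      · have hc' : (p != "" && PySem.Set.contains subs p) = false := by
          revert hc; cases (p != "" && PySem.Set.contains subs p) <;> simp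
        have hra : pvRouted subs a.1 = false := by simp only [pvRouted, hp]; exact hc'
        simp only [hp, hc', Bool.false_eq_true, if_false]
        rw [ih]
        simp [hra]

lemma pv_contains_iff (subs : PySem.Set String) (x : String) :
    PySem.Set.contains subs x = true ↔ x ∈ subs := by
  simp [PySem.Set.contains]

lemma pv_not_isEmpty_filter {α : Type} (l : List α) (p : α → Bool) :
    (!(l.filter p).isEmpty) = l.any p := by
  induction l with
  | nil => simp
  | cons a l ih => cases hpa : p a <;> simp [hpa, ih]

lemma pv_pred_eq (subs : PySem.Set String) (m : String) (hm : m ∈ subs) (hne : m ≠ "")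
    (a : PvAcc) :
    (pvRouted subs a.1 && (get_parent a.1 == some m)) = (get_parent a.1 == some m) := by
  cases hp : get_parent a.1 with
  | none => simp [hp]
  | some p =>
    by_cases hpm : p = m
    · subst hpm
      have h2 : PySem.Set.contains subs p = true := (pv_contains_iff subs p).mpr hm
      have : pvRouted subs a.1 = true := by
        simp only [pvRouted, hp, h2]
        simp [hne]
      simp [this]
    · simp [hp, hpm]

lemma pv_pred_empty (subs : PySem.Set String) (a : PvAcc) :
    (pvRouted subs a.1 && (get_parent a.1 == some "")) = false := by
  cases hp : get_parent a.1 with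
  | none => simp [hp]
  | some p =>
    by_cases hpe : p = ""
    · subst hpe
      have : pvRouted subs a.1 = false := by simp [pvRouted, hp]
      simp [this]
    · simp [hp, hpe]

-- ===== VERDICT (by name: the statement is the Claim_ definition above) =====
theorem filter_subaccounts_spec : Claim_equal_filter_subaccounts := by
  intro subaccts accounts _hdom
  unfold Spec_filter_subaccounts
  simp only [filter_subaccounts, filter_subaccounts_alt]
  simp only [pv_children_getD accounts (fun a => get_parent a.1),
    pv_children_contains accounts (fun a => get_parent a.1)]
  rw [pv_init_dict (PySem.Set.ofList subaccts) (PySem.Set.nodup_ofList subaccts)]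
  rw [pv_split]
  set subs := PySem.Set.ofList subaccts with hsubs
  rw [pv_dict_loop subs _ subs (fun x hx => (pv_contains_iff subs x).mp hx)]
  dsimp only
  simp only [List.nil_append]
  refine Prod.ext ?_ ?_
  · -- bucket dict
    rw [List.filter_map]
    dsimp only [Function.comp_def]
    have hout : List.filter (fun m => !(List.filter (fun a => pvRouted subs a.1 && get_parent a.1 == some m) accounts).isEmpty) subs
        = List.filter (fun m => m != "" && accounts.any fun a => get_parent a.1 == some m) subs := by
      apply List.filter_congr
      intro m hm
      by_cases hne : m = ""
      · subst hne
        rw [List.filter_congr (fun a _ => pv_pred_empty subs a)]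
        simp
      · rw [List.filter_congr (fun a _ => pv_pred_eq subs m hm hne a),
          pv_not_isEmpty_filter]
        simp [hne]
    rw [hout]
    apply List.map_congr_left
    intro m hm
    rcases List.mem_filter.mp hm with ⟨hms, hg⟩
    have hne : m ≠ "" := by
      simp only [Bool.and_eq_true] at hg
      simpa using hg.1
    rw [List.filter_congr (fun a _ => pv_pred_eq subs m hms hne a)]
  · -- standalone list
    dsimp only
    simp only [List.map_map, Function.comp_def, List.map_id']
    have hM : ∀ x : String,
        (accounts.foldl (fun m a =>
            match get_parent a.1 with
            | some parent =>
              if parent != "" && PySem.Set.contains subs parent then PySem.Set.add m parent else m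
            | none => m) PySem.Set.empty).contains x
        = (List.filter (fun m => m != "" && accounts.any fun a => get_parent a.1 == some m) subs).contains x := by
      intro x
      apply Bool.coe_iff_coe.mp
      rw [pv_contains_iff, List.contains_iff_mem]
      rw [pv_maj_mem subs accounts PySem.Set.empty x, List.mem_filter]
      constructor
      · rintro (h | ⟨a, ha, hra, hpa⟩)
        · simp [PySem.Set.empty] at h
        · have hx : x ≠ "" ∧ PySem.Set.contains subs x = true := by
            have := hra
            simp only [pvRouted, hpa] at this
            simpa using this
          exact ⟨(pv_contains_iff subs x).mp hx.2, by
            simp only [Bool.and_eq_true]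
            exact ⟨by simpa using hx.1, List.any_eq_true.mpr ⟨a, ha, by simp [hpa]⟩⟩⟩
      · rintro ⟨hxs, hg⟩
        simp only [Bool.and_eq_true, List.any_eq_true] at hg
        rcases hg with ⟨hne, a, ha, hpa⟩
        refine Or.inr ⟨a, ha, ?_, by simpa using hpa⟩
        simp only [pvRouted, (by simpa using hpa : get_parent a.1 = some x)]
        simp only [(pv_contains_iff subs x).mpr hxs, Bool.and_true]
        simp [(by simpa using hne : x ≠ "")]
    rw [List.filter_filter]
    apply List.filter_congr
    intro a _
    rw [hM a.1, Bool.and_comm]
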